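-- pv_equiv track=rewrite | github.com/anchen1011/mindex | mindex/codoxear.py | _sanitize_argv_for_logging
-- ===== SOURCE A (Python) =====
-- def _sanitize_argv_for_logging(argv: list[str]) -> list[str]:
--     """Redact secrets from argv before writing to logs."""
--     sanitized: list[str] = []
--     idx = 0
--     while idx < len(argv):
--         item = argv[idx]
--         if item == "--password":
--             sanitized.append("--password")
--             if idx + 1 < len(argv):
--                 sanitized.append("****")
--                 idx += 2
--                 continue
--             idx += 1
--             continue
--         if item.startswith("--password="):
--             sanitized.append("--password=****")
--             idx += 1
--             continue
--         sanitized.append(item)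
--         idx += 1
--     return sanitized
-- ===== SOURCE B (Python) =====
-- def _sanitize_argv_for_logging(argv: list[str]) -> list[str]:
--     """Redact secrets from argv before writing to logs."""
--     if "--password" not in argv:
--         return ["--password=****" if x.startswith("--password=") else x for x in argv]
--     i = argv.index("--password")
--     head = ["--password=****" if x.startswith("--password=") else x for x in argv[:i]]
--     if i + 1 < len(argv):
--         return head + ["--password", "****"] + _sanitize_argv_for_logging(argv[i + 2:])
--     return head + ["--password"]
-- ===== Notes on version B (the rewrite author's own statement) =====
-- stated objective: alternative
-- what changed: Replaces A's single stateful index-walk by a divide-and-conquer on the first occurrence of '--password': a membership test, list.index, a comprehension masking the password-free prefix slice, and recursion on the slice after the consumed value.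
import Mathlib
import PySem

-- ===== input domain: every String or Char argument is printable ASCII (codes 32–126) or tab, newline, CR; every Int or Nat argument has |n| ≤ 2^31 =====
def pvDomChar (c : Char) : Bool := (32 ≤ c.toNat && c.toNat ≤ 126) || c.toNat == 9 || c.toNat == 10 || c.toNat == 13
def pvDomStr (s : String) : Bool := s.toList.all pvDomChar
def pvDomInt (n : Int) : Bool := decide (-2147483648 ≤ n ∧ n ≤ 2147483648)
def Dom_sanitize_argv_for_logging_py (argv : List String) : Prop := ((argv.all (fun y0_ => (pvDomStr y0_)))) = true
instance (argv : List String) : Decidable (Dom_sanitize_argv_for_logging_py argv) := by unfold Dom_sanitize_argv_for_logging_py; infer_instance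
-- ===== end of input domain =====

-- B splits at the first '--password' (membership test, index, masked prefix slice,
-- recursion on the tail) instead of A's stateful index-walk: an alternative
-- decomposition of the same O(n) task.


-- ===== PORT A =====
-- A's while-loop over idx; each iteration consumes one element, or two when
-- '--password' is followed by a value (idx += 2): ported as recursion on the
-- remaining suffix, matching A's branches in order.
def sanitize_argv_for_logging_py (argv : List String) : List String :=
  match argv with
  | [] => []
  | item :: rest =>
    if item == "--password" then
      match rest with
      | _ :: rest' => "--password" :: "****" :: sanitize_argv_for_logging_py rest'
      | [] => ["--password"]
    else if PySem.Str.startswith item "--password=" then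
      "--password=****" :: sanitize_argv_for_logging_py rest
    else
      item :: sanitize_argv_for_logging_py rest

-- ===== PORT B =====
-- the comprehension's element transform: '--password=****' if x.startswith("--password=") else x
def pvMask (x : String) : String :=
  if PySem.Str.startswith x "--password=" then "--password=****" else x

-- Source B: membership test, argv.index('--password'), masked prefix slice argv[:i],
-- then recursion on argv[i+2:] (slices via take/drop).
def sanitize_argv_for_logging_py_alt (argv : List String) : List String :=
  if h : "--password" ∈ argv then
    let i := argv.idxOf "--password"
    let head := (argv.take i).map pvMask
    if i + 1 < argv.length then
      head ++ ["--password", "****"] ++ sanitize_argv_for_logging_py_alt (argv.drop (i + 2))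
    else
      head ++ ["--password"]
  else
    argv.map pvMask
termination_by argv.length
decreasing_by
  cases argv with
  | nil => simp at h
  | cons a l => simp [List.length_drop]

-- ===== PRECONDITION & SPEC =====
def Spec_sanitize_argv_for_logging_py (argv : List String) (out : List String) : Prop := out = sanitize_argv_for_logging_py_alt argv
instance (argv : List String) (out : List String) : Decidable (Spec_sanitize_argv_for_logging_py argv out) := by unfold Spec_sanitize_argv_for_logging_py; infer_instance

-- ===== CLAIM (what is proved, stated in full; the proofs are below) =====
def Claim_equal_sanitize_argv_for_logging_py : Prop := ∀ (argv : List String), Dom_sanitize_argv_for_logging_py argv → Spec_sanitize_argv_for_logging_py argv (sanitize_argv_for_logging_py argv)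

-- ===== LEMMAS AND PROOFS =====

-- A on a password-free list is the elementwise mask.
theorem pvA_no_pw (xs : List String) (h : "--password" ∉ xs) :
    sanitize_argv_for_logging_py xs = xs.map pvMask := by
  induction xs with
  | nil => rfl
  | cons a l ih =>
    simp only [List.mem_cons, not_or] at h
    have ha : (a == "--password") = false := beq_eq_false_iff_ne.mpr (Ne.symm h.1)
    rw [sanitize_argv_for_logging_py.eq_def]
    simp [ha, pvMask, ih h.2]
    split <;> rfl

-- A on prefix ++ '--password' :: rest, with a password-free prefix.
theorem pvA_split (xs rest : List String) (h : "--password" ∉ xs) :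
    sanitize_argv_for_logging_py (xs ++ "--password" :: rest) =
      xs.map pvMask ++ "--password" ::
        (match rest with
         | [] => []
         | _ :: rest' => "****" :: sanitize_argv_for_logging_py rest') := by
  induction xs with
  | nil =>
    cases rest <;> simp [sanitize_argv_for_logging_py]
  | cons a l ih =>
    simp only [List.mem_cons, not_or] at h
    have ha : (a == "--password") = false := beq_eq_false_iff_ne.mpr (Ne.symm h.1)
    rw [List.cons_append, sanitize_argv_for_logging_py.eq_def]
    simp [ha, pvMask, ih h.2]
    split <;> rfl

-- the two ports agree on every input (no domain assumption needed)
theorem pv_main (argv : List String) :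
    sanitize_argv_for_logging_py argv = sanitize_argv_for_logging_py_alt argv := by
  induction argv using sanitize_argv_for_logging_py_alt.induct with
  | case1 argv h i hcond ih =>
    have hi : i < argv.length := List.idxOf_lt_length_of_mem h
    have hdec : argv = argv.take i ++ "--password" :: argv.drop (i + 1) := by
      conv_lhs => rw [← List.take_append_drop i argv]
      rw [List.drop_eq_getElem_cons hi, List.getElem_idxOf hi]
    have hnp : "--password" ∉ argv.take i := by
      intro hm
      have := (List.mem_take_iff_idxOf_lt h).mp hm
      omega
    have hrest : argv.drop (i + 1) = argv[i + 1] :: argv.drop (i + 2) :=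
      List.drop_eq_getElem_cons hcond
    have hcond' : List.idxOf "--password" argv + 1 < argv.length := hcond
    conv_rhs => rw [sanitize_argv_for_logging_py_alt]
    simp only [dif_pos h, if_pos hcond']
    conv_lhs => rw [hdec]
    rw [pvA_split _ _ hnp, hrest]
    simp only [show i = List.idxOf "--password" argv from rfl] at ih ⊢
    simp [ih]
  | case2 argv h i hcond =>
    have hi : i < argv.length := List.idxOf_lt_length_of_mem h
    have hdec : argv = argv.take i ++ "--password" :: argv.drop (i + 1) := by
      conv_lhs => rw [← List.take_append_drop i argv]
      rw [List.drop_eq_getElem_cons hi, List.getElem_idxOf hi]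
    have hnp : "--password" ∉ argv.take i := by
      intro hm
      have := (List.mem_take_iff_idxOf_lt h).mp hm
      omega
    have hrest : argv.drop (i + 1) = [] := by
      rw [List.drop_eq_nil_iff]; omega
    have hcond' : ¬ List.idxOf "--password" argv + 1 < argv.length := hcond
    conv_rhs => rw [sanitize_argv_for_logging_py_alt]
    simp only [dif_pos h, if_neg hcond']
    conv_lhs => rw [hdec]
    rw [pvA_split _ _ hnp, hrest]
  | case3 argv h =>
    rw [sanitize_argv_for_logging_py_alt, dif_neg h]
    exact pvA_no_pw argv h

-- ===== VERDICT (by name: the statement is the Claim_ definition above) =====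
theorem sanitize_argv_for_logging_py_spec : Claim_equal_sanitize_argv_for_logging_py := by
  intro argv _
  exact pv_main argv
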